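-- pv_equiv track=rewrite | github.com/TonyDongLB/PJ_OCR | img_process/utils/segment.py | extract_peek_ranges_from_array
-- ===== SOURCE A (Python) =====
-- def extract_peek_ranges_from_array(array_vals, minimun_val=20000, minimun_range=10):
--     start_i = None
--     end_i = None
--     peek_ranges = []
--     for i, val in enumerate(array_vals):
--         if val > minimun_val and start_i is None:
--             start_i = i
--         elif val > minimun_val and start_i is not None:
--             pass
--         elif val < minimun_val and start_i is not None:
--             end_i = i
--             if end_i - start_i >= minimun_range:
--                 peek_ranges.append([start_i, end_i])
--             start_i = None
--             end_i = None
--         elif val < minimun_val and start_i is None: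
--             pass
--         else:
--             raise ValueError("cannot parse this case...")
--     return peek_ranges
-- ===== SOURCE B (Python) =====
-- def extract_peek_ranges_from_array(array_vals, minimun_val=20000, minimun_range=10):
--     if any(v == minimun_val for v in array_vals):
--         raise ValueError("cannot parse this case...")
--     flags = [v > minimun_val for v in array_vals]
--     # pair each flag with the previous one (False before the start); zip drops the extra tail
--     edges = list(zip(flags, [False] + flags))
--     starts = [i for i, (f, p) in enumerate(edges) if f and not p]   # rising edges
--     ends = [i for i, (f, p) in enumerate(edges) if p and not f]     # falling edges
--     # zip pairs each rising edge with its falling edge and drops a trailing open run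
--     return [[s, e] for s, e in zip(starts, ends) if e - s >= minimun_range]
-- ===== Notes on version B (the rewrite author's own statement) =====
-- stated objective: alternative
-- what changed: B replaces A's single stateful scan by edge detection: it zips the above-threshold flag list with its shifted copy to list rising-edge and falling-edge indices, pairs them with zip (which drops a trailing open run), and filters pairs by length; Pre_ excludes inputs containing an element equal to minimun_val, on which both A and B raise ValueError.
import Mathlib
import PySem

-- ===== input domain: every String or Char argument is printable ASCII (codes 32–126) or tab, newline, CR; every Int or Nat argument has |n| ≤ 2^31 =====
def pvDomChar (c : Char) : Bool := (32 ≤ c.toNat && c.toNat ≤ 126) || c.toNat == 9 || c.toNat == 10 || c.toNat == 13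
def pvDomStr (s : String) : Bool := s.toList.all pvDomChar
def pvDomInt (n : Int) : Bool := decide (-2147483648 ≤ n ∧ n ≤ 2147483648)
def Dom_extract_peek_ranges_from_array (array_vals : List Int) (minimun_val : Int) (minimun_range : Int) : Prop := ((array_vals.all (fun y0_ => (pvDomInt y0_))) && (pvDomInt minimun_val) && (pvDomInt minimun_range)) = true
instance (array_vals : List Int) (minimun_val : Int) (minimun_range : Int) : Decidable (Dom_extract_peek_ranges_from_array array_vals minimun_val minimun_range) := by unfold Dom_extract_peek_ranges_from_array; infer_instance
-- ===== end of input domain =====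

-- B finds peak ranges by edge detection (rising/falling edge index lists zipped together)
-- instead of A's stateful scan; same cost, proved equal on all inputs with no element = minimun_val.

-- ===== PORT A =====
-- the loop of A; `none` result = the `raise ValueError` branch (val == minimun_val)
def pvLoopA (mv mr : Int) : List Int → Int → Option Int → List (List Int) → Option (List (List Int))
  | [], _, _, peek_ranges => some peek_ranges
  | val :: rest, i, start_i, peek_ranges =>
    if val > mv then
      match start_i with
      | none => pvLoopA mv mr rest (i+1) (some i) peek_ranges
      | some _ => pvLoopA mv mr rest (i+1) start_i peek_ranges
    else if val < mv then
      match start_i with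
      | some s =>
        pvLoopA mv mr rest (i+1) none (if i - s ≥ mr then peek_ranges ++ [[s, i]] else peek_ranges)
      | none => pvLoopA mv mr rest (i+1) none peek_ranges
    else none

def extract_peek_ranges_from_array (array_vals : List Int) (minimun_val : Int) (minimun_range : Int) : List (List Int) :=
  (pvLoopA minimun_val minimun_range array_vals 0 none []).getD []

-- ===== PORT B =====
def extract_peek_ranges_from_array_alt (array_vals : List Int) (minimun_val : Int) (minimun_range : Int) : List (List Int) :=
  if array_vals.any (fun v => v == minimun_val) then []  -- Python B raises ValueError here (excluded by Pre_)
  else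
    let flags := array_vals.map (fun v => decide (v > minimun_val))
    let edges := flags.zip (false :: flags)
    let starts := ((PySem.List.enumerate edges).filter (fun x => x.2.1 && !x.2.2)).map (fun x => x.1)
    let ends := ((PySem.List.enumerate edges).filter (fun x => x.2.2 && !x.2.1)).map (fun x => x.1)
    ((starts.zip ends).filter (fun x => x.2 - x.1 ≥ minimun_range)).map (fun x => [x.1, x.2])

-- ===== PRECONDITION & SPEC =====
-- Pre_ excludes inputs with an element equal to minimun_val: there A (and B) raise ValueError.
def Pre_extract_peek_ranges_from_array (array_vals : List Int) (minimun_val : Int) (minimun_range : Int) : Prop :=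
  ∀ v ∈ array_vals, v ≠ minimun_val
instance (array_vals : List Int) (minimun_val : Int) (minimun_range : Int) : Decidable (Pre_extract_peek_ranges_from_array array_vals minimun_val minimun_range) := by unfold Pre_extract_peek_ranges_from_array; infer_instance

def pvWitness_extract_peek_ranges_from_array : List Int × Int × Int := ([21000, 21000, 0, 21000], 20000, 2)

def Spec_extract_peek_ranges_from_array (array_vals : List Int) (minimun_val : Int) (minimun_range : Int) (out : List (List Int)) : Prop := out = extract_peek_ranges_from_array_alt array_vals minimun_val minimun_range
instance (array_vals : List Int) (minimun_val : Int) (minimun_range : Int) (out : List (List Int)) : Decidable (Spec_extract_peek_ranges_from_array array_vals minimun_val minimun_range out) := by unfold Spec_extract_peek_ranges_from_array; infer_instance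

-- ===== CLAIM (what is proved, stated in full; the proofs are below) =====
def Claim_equal_extract_peek_ranges_from_array : Prop := ∀ (array_vals : List Int) (minimun_val : Int) (minimun_range : Int), Dom_extract_peek_ranges_from_array array_vals minimun_val minimun_range → Pre_extract_peek_ranges_from_array array_vals minimun_val minimun_range → Spec_extract_peek_ranges_from_array array_vals minimun_val minimun_range (extract_peek_ranges_from_array array_vals minimun_val minimun_range)

-- ===== LEMMAS AND PROOFS =====

-- the closed ranges, as a recursion over the flag list with a pending open start
def pvPairs : List Bool → Int → Option Int → List (Int × Int)
  | [], _, _ => []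
  | true :: fs, i, none => pvPairs fs (i+1) (some i)
  | true :: fs, i, some s => pvPairs fs (i+1) (some s)
  | false :: fs, i, some s => (s, i) :: pvPairs fs (i+1) none
  | false :: fs, i, none => pvPairs fs (i+1) none

-- rising-edge and falling-edge indices, recursively with the previous flag carried
def pvSt : List Bool → Bool → Int → List Int
  | [], _, _ => []
  | f :: fs, prev, i => (if f && !prev then [i] else []) ++ pvSt fs f (i+1)
def pvEn : List Bool → Bool → Int → List Int
  | [], _, _ => []
  | f :: fs, prev, i => (if prev && !f then [i] else []) ++ pvEn fs f (i+1)

theorem pvLoopA_eq (mv mr : Int) (vals : List Int) (i : Int) (start : Option Int)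
    (acc : List (List Int)) (h : ∀ v ∈ vals, v ≠ mv) :
    pvLoopA mv mr vals i start acc =
      some (acc ++ ((pvPairs (vals.map (fun v => decide (v > mv))) i start).filter
        (fun x => x.2 - x.1 ≥ mr)).map (fun x => [x.1, x.2])) := by
  induction vals generalizing i start acc with
  | nil => simp [pvLoopA, pvPairs]
  | cons v rest ih =>
    have hv : v ≠ mv := h v (by simp)
    have hrest : ∀ w ∈ rest, w ≠ mv := fun w hw => h w (by simp [hw])
    rcases lt_trichotomy v mv with hlt | heq | hgt
    · have hng : ¬ v > mv := by omega
      cases start with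
      | none =>
        simp [pvLoopA, hng, hlt, pvPairs, ih _ _ _ hrest]
      | some s =>
        simp only [pvLoopA, if_neg hng, if_pos hlt, ih _ _ _ hrest]
        by_cases hlen : i - s ≥ mr <;>
          simp [pvPairs, hng, hlen, List.map]
    · exact absurd heq hv
    · cases start with
      | none => simp [pvLoopA, hgt, pvPairs, ih _ _ _ hrest]
      | some s => simp [pvLoopA, hgt, pvPairs, ih _ _ _ hrest]

theorem pvSt_eq (fs : List Bool) (prev : Bool) (a : Int) :
    ((PySem.List.enumerate (fs.zip (prev :: fs)) a).filter (fun x => x.2.1 && !x.2.2)).map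
      (fun x => x.1) = pvSt fs prev a := by
  induction fs generalizing prev a with
  | nil => simp [pvSt, PySem.List.enumerate_nil]
  | cons f fs ih =>
    simp only [List.zip_cons_cons, PySem.List.enumerate_cons, pvSt]
    by_cases hf : (f && !prev) = true <;> simp [List.filter, hf, ih]

theorem pvEn_eq (fs : List Bool) (prev : Bool) (a : Int) :
    ((PySem.List.enumerate (fs.zip (prev :: fs)) a).filter (fun x => x.2.2 && !x.2.1)).map
      (fun x => x.1) = pvEn fs prev a := by
  induction fs generalizing prev a with
  | nil => simp [pvEn, PySem.List.enumerate_nil]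
  | cons f fs ih =>
    simp only [List.zip_cons_cons, PySem.List.enumerate_cons, pvEn]
    by_cases hf : (prev && !f) = true <;> simp [List.filter, hf, ih]

theorem pvZip_eq (fs : List Bool) (i : Int) (pend : Option Int) :
    (pend.toList ++ pvSt fs pend.isSome i).zip (pvEn fs pend.isSome i) = pvPairs fs i pend := by
  induction fs generalizing i pend with
  | nil => cases pend <;> simp [pvSt, pvEn, pvPairs]
  | cons f fs ih =>
    cases pend with
    | none =>
      cases f with
      | true =>
        have := ih (i+1) (some i)
        simpa [pvSt, pvEn, pvPairs] using this
      | false =>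
        have := ih (i+1) none
        simpa [pvSt, pvEn, pvPairs] using this
    | some s =>
      cases f with
      | true =>
        have := ih (i+1) (some s)
        simpa [pvSt, pvEn, pvPairs] using this
      | false =>
        have := ih (i+1) none
        simpa [pvSt, pvEn, pvPairs] using this

-- ===== VERDICT (by name: the statement is the Claim_ definition above) =====
theorem extract_peek_ranges_from_array_spec : Claim_equal_extract_peek_ranges_from_array := by
  intro array_vals mv mr _ hpre
  unfold Spec_extract_peek_ranges_from_array extract_peek_ranges_from_array
    extract_peek_ranges_from_array_alt
  have hany : (array_vals.any (fun v => v == mv)) = false := by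
    simp only [List.any_eq_false, beq_iff_eq]
    exact hpre
  rw [pvLoopA_eq mv mr array_vals 0 none [] hpre]
  simp only [hany, Bool.false_eq_true, if_false, Option.getD_some, List.nil_append]
  rw [pvSt_eq, pvEn_eq]
  have := pvZip_eq (array_vals.map (fun v => decide (v > mv))) 0 none
  simpa using this.symm ▸ rfl
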